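-- pv_equiv track=rewrite | github.com/frankframework/frank-manual | TutorialSteps/stringListCompare.py | getIndentAndCheck
-- ===== SOURCE A (Python) =====
-- def getIndentAndCheck(line):
--     if not type(line) is str:
--         raise TypeError("line should be string")
--     numIndent = 0
--     for c in line:
--         if c == " ":
--             numIndent += 1
--         elif c == "\t":
--             err = "Line contains tabs: " + line
--             return 0, err
--         elif c == "\r":
--             err = "Line contains \\r: " + line
--             return 0, err
--         elif c == "\n":
--             err = "Line contains \\n: " + line
--             return 0, err
--         else:
--             return numIndent, None
-- ===== SOURCE B (Python) =====
-- def getIndentAndCheck(line):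
--     if not type(line) is str:
--         raise TypeError("line should be string")
--     stripped = line.lstrip(" ")
--     if not stripped:
--         return None  # all spaces / empty: same bare-None fall-through as the original
--     numIndent = len(line) - len(stripped)
--     c = stripped[0]
--     if c == "\t":
--         return 0, "Line contains tabs: " + line
--     if c == "\r":
--         return 0, "Line contains \\r: " + line
--     if c == "\n":
--         return 0, "Line contains \\n: " + line
--     return numIndent, None
-- ===== Notes on version B (the rewrite author's own statement) =====
-- stated objective: simpler
-- what changed: Replaces the character-by-character counting loop with an up-front lstrip(' '): the indent is len(line)-len(stripped) and only the single boundary character stripped[0] is inspected for tab/CR/LF.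
-- outside the precondition, e.g. on getIndentAndCheck(' '): A returns None, B returns None; on getIndentAndCheck('  '): A returns None, B returns None; on getIndentAndCheck(''): A returns None, B returns None
import Mathlib
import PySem

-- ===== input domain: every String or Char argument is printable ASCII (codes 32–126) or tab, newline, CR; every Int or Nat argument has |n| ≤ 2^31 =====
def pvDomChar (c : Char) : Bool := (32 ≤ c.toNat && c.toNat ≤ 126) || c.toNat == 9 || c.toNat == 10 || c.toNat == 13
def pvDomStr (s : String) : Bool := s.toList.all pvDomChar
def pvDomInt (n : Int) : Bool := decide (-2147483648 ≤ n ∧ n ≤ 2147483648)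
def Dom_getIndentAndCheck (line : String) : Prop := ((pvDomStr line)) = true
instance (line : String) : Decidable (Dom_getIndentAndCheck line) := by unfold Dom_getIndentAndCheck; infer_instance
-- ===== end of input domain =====

-- B computes the indent with one lstrip(' ') and inspects only the boundary character; simpler than A's counting loop. Same O(n).


-- ===== PORT A =====
-- the for-loop over the characters, carrying the numIndent accumulator
def pyGoA (line : String) (acc : Int) : List Char → Int × Option String
  | [] => (acc, none)  -- Python falls through returning bare None here (all-space line); outside Pre_
  | c :: cs =>
    if c = ' ' then pyGoA line (acc + 1) cs
    else if c = '\t' then (0, some ("Line contains tabs: " ++ line))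
    else if c = '\r' then (0, some ("Line contains \\r: " ++ line))
    else if c = '\n' then (0, some ("Line contains \\n: " ++ line))
    else (acc, none)

def getIndentAndCheck (line : String) : Int × Option String := pyGoA line 0 line.toList

-- ===== PORT B =====
def getIndentAndCheck_alt (line : String) : Int × Option String :=
  let stripped := line.toList.dropWhile (fun c => c = ' ')  -- lstrip(' ') is exactly dropWhile (= ' ')
  match stripped with
  | [] => (0, none)  -- Python returns bare None here (all-space line); outside Pre_
  | c :: _ =>
    if c = '\t' then (0, some ("Line contains tabs: " ++ line))
    else if c = '\r' then (0, some ("Line contains \\r: " ++ line))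
    else if c = '\n' then (0, some ("Line contains \\n: " ++ line))
    else ((line.toList.length : Int) - (stripped.length : Int), none)

-- ===== PRECONDITION & SPEC =====
-- Pre_ excludes all-space (incl. empty) lines: there both Pythons fall through and return a bare None,
-- which is not a value of the declared pair type.
def Pre_getIndentAndCheck (line : String) : Prop :=
  line.toList.any (fun c => c ≠ ' ') = true
instance (line : String) : Decidable (Pre_getIndentAndCheck line) := by unfold Pre_getIndentAndCheck; infer_instance

def pvWitness_getIndentAndCheck : String := "  x"

def Spec_getIndentAndCheck (line : String) (out : Int × Option String) : Prop := out = getIndentAndCheck_alt line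
instance (line : String) (out : Int × Option String) : Decidable (Spec_getIndentAndCheck line out) := by unfold Spec_getIndentAndCheck; infer_instance

-- ===== CLAIM (what is proved, stated in full; the proofs are below) =====
def Claim_equal_getIndentAndCheck : Prop := ∀ (line : String), Dom_getIndentAndCheck line → Pre_getIndentAndCheck line → Spec_getIndentAndCheck line (getIndentAndCheck line)

-- ===== LEMMAS AND PROOFS =====

-- the loop with accumulator acc equals B's boundary-character analysis, with the indent shifted by acc
theorem pyGoA_eq (line : String) : ∀ (cs : List Char) (acc : Int),
    cs.any (fun c => c ≠ ' ') = true →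
    pyGoA line acc cs =
      match cs.dropWhile (fun c => c = ' ') with
      | [] => (0, none)
      | c :: _ =>
        if c = '\t' then (0, some ("Line contains tabs: " ++ line))
        else if c = '\r' then (0, some ("Line contains \\r: " ++ line))
        else if c = '\n' then (0, some ("Line contains \\n: " ++ line))
        else (acc + ((cs.length : Int) - (((cs.dropWhile (fun c => c = ' ')).length : Int))), none) := by
  intro cs
  induction cs with
  | nil => intro acc h; simp at h
  | cons c cs ih =>
    intro acc h
    by_cases hc : c = ' '
    · subst hc
      have h' : cs.any (fun c => c ≠ ' ') = true := by
        simp only [List.any_cons] at h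
        rcases Bool.or_eq_true_iff.mp h with h1 | h1
        · simp at h1
        · exact h1
      have := ih (acc + 1) h'
      simp only [pyGoA, List.dropWhile_cons, decide_true, List.length_cons]
      rw [this]
      have hlen : (cs.dropWhile (fun c => c = ' ')).length ≤ cs.length :=
        List.length_dropWhile_le _ _
      rcases hdw : cs.dropWhile (fun c => c = ' ') with _ | ⟨d, ds⟩ <;> simp [hdw] at *
      split_ifs <;> simp <;> omega
    · have hdw : (c :: cs).dropWhile (fun c => c = ' ') = c :: cs := by
        simp [hc]
      simp only [pyGoA, if_neg hc, hdw]
      split_ifs <;> simp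

-- ===== VERDICT (by name: the statement is the Claim_ definition above) =====
theorem getIndentAndCheck_spec : Claim_equal_getIndentAndCheck := by
  intro line _ hpre
  unfold Spec_getIndentAndCheck getIndentAndCheck getIndentAndCheck_alt
  rw [pyGoA_eq line line.toList 0 hpre]
  rcases hdw : line.toList.dropWhile (fun c => c = ' ') with _ | ⟨c, cs⟩ <;> simp
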